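-- pv_equiv track=rewrite | github.com/sumitglobussoft/medcore | scripts/dark_pass.py | _scan_template
-- ===== SOURCE A (Python) =====
-- def _scan_string(text: str, start: int, quote: str) -> int:
--     """Return index past the closing quote for a string starting at start (text[start] == quote)."""
--     k = start + 1
--     n = len(text)
--     while k < n:
--         if text[k] == "\\":
--             k += 2
--             continue
--         if text[k] == quote:
--             return k + 1
--         k += 1
--     return n
--
-- def _scan_template(text: str, start: int) -> int:
--     """Return index past the closing backtick, treating ${...} as nested expressions."""
--     k = start + 1
--     n = len(text)
--     while k < n:
--         if text[k] == "\\":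
--             k += 2
--             continue
--         if text[k] == "`":
--             return k + 1
--         if text[k] == "$" and k + 1 < n and text[k+1] == "{":
--             # nested ${ ... }
--             k += 2
--             depth = 1
--             while k < n and depth > 0:
--                 c = text[k]
--                 if c == '"' or c == "'":
--                     k = _scan_string(text, k, c)
--                     continue
--                 if c == "`":
--                     k = _scan_template(text, k)
--                     continue
--                 if c == "{":
--                     depth += 1
--                 elif c == "}":
--                     depth -= 1
--                     if depth == 0:
--                         k += 1
--                         break
--                 k += 1
--             continue
--         k += 1
--     return n
-- ===== SOURCE B (Python) =====
-- def _scan_template(text: str, start: int) -> int: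
--     """Return index past the closing backtick, treating ${...} as nested expressions.
--
--     One flat loop over an explicit stack of scanning contexts instead of
--     mutual recursion: ("tmpl", None) = template body, ("str", q) = string
--     quoted by q, ("expr", d) = ${...} expression at brace depth d.
--     """
--     n = len(text)
--     k = start + 1
--     stack = [("tmpl", None)]
--     while stack:
--         if k >= n:
--             return n
--         c = text[k]
--         mode, arg = stack[-1]
--         if mode == "tmpl":
--             if c == "\\":
--                 k += 2
--             elif c == "`":
--                 stack.pop()
--                 k += 1
--             elif c == "$" and k + 1 < n and text[k + 1] == "{":
--                 stack.append(("expr", 1))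
--                 k += 2
--             else:
--                 k += 1
--         elif mode == "str":
--             if c == "\\":
--                 k += 2
--             elif c == arg:
--                 stack.pop()
--                 k += 1
--             else:
--                 k += 1
--         else:  # expr
--             if c == '"' or c == "'":
--                 stack.append(("str", c))
--                 k += 1
--             elif c == "`":
--                 stack.append(("tmpl", None))
--                 k += 1
--             elif c == "{":
--                 stack[-1] = ("expr", arg + 1)
--                 k += 1
--             elif c == "}":
--                 if arg == 1:
--                     stack.pop()
--                 else:
--                     stack[-1] = ("expr", arg - 1)
--                 k += 1
--             else:
--                 k += 1
--     return k
-- ===== Notes on version B (the rewrite author's own statement) =====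
-- stated objective: alternative
-- what changed: Replaced the mutually recursive scanner (_scan_template calling itself and _scan_string, with a nested depth loop) by a single flat loop over an explicit stack of scanning contexts (template body / quoted string / ${...} brace depth).
-- outside the precondition, e.g. on _scan_template('`ab`', -7): A raises IndexError, B raises IndexError
import Mathlib
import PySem

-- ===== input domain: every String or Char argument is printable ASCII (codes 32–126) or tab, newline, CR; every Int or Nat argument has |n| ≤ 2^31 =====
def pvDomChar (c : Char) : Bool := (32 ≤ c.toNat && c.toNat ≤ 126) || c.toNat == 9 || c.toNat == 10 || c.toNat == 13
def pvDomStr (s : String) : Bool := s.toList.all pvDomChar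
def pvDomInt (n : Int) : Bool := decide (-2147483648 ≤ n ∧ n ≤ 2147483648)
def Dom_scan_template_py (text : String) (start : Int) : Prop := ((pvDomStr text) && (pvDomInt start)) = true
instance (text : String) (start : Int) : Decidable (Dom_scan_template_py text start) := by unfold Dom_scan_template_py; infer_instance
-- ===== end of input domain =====

-- B re-implements the mutually recursive scanner as one flat loop over an explicit
-- stack of scanning contexts (alternative decomposition; same cost). Return value only.
-- All loops carry a fuel parameter purely as a termination gadget; the entry points
-- supply fuel that is provably sufficient, so the 0-fuel branch is never reached on
-- Pre_ inputs.

-- ===== PORT A =====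
-- _scan_string's while loop (position k over text as a char list)
def scanStringLoopA (cs : List Char) (quote : Char) : Nat → Int → Int
  | 0, _ => 0  -- fuel exhausted (unreachable for the fuel supplied at entry)
  | fuel + 1, k =>
    if k < (cs.length : Int) then
      match PySem.List.pyGet? cs k with
      | none => 0  -- Python raises IndexError here; unreachable under Pre_
      | some c =>
        if c = '\\' then scanStringLoopA cs quote fuel (k + 2)
        else if c = quote then k + 1
        else scanStringLoopA cs quote fuel (k + 1)
    else (cs.length : Int)

-- _scan_string: `k = start + 1`, then the loop
def scanStringA (cs : List Char) (start : Int) (quote : Char) : Int :=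
  scanStringLoopA cs quote (((cs.length : Int) - (start + 1)).toNat + 1) (start + 1)

-- _scan_template's two while loops, transliterated with one fuel unit per iteration
mutual
def scanTemplateLoopA (cs : List Char) : Nat → Int → Int
  | 0, _ => 0  -- fuel exhausted (unreachable for the fuel supplied at entry)
  | fuel + 1, k =>
    if k < (cs.length : Int) then
      match PySem.List.pyGet? cs k with
      | none => 0  -- Python raises IndexError here; unreachable under Pre_
      | some c =>
        if c = '\\' then scanTemplateLoopA cs fuel (k + 2)
        else if c = '`' then k + 1
        else if c = '$' ∧ k + 1 < (cs.length : Int) ∧ PySem.List.pyGet? cs (k + 1) = some '{' then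
          scanExprLoopA cs fuel (k + 2) 1
        else scanTemplateLoopA cs fuel (k + 1)
    else (cs.length : Int)

-- the inner `while k < n and depth > 0` loop; on exit / break it continues the outer loop
def scanExprLoopA (cs : List Char) : Nat → Int → Int → Int
  | 0, _, _ => 0  -- fuel exhausted (unreachable for the fuel supplied at entry)
  | fuel + 1, k, depth =>
    if k < (cs.length : Int) ∧ 0 < depth then
      match PySem.List.pyGet? cs k with
      | none => 0  -- Python raises IndexError here; unreachable under Pre_
      | some c =>
        if c = '"' ∨ c = '\'' then scanExprLoopA cs fuel (scanStringA cs k c) depth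
        else if c = '`' then scanExprLoopA cs fuel (scanTemplateLoopA cs fuel (k + 1)) depth
        else if c = '{' then scanExprLoopA cs fuel (k + 1) (depth + 1)
        else if c = '}' then
          if depth - 1 = 0 then scanTemplateLoopA cs fuel (k + 1)  -- break, continue outer loop
          else scanExprLoopA cs fuel (k + 1) (depth - 1)
        else scanExprLoopA cs fuel (k + 1) depth
    else scanTemplateLoopA cs fuel k  -- loop exit: continue the outer loop at k
end

def scan_template_py (text : String) (start : Int) : Int :=
  scanTemplateLoopA text.toList
    (2 * (((text.toList.length : Int) - (start + 1)).toNat) + 1) (start + 1)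

-- ===== PORT B =====
-- a scanning context: template body, string quoted by q, or ${...} at brace depth d
inductive PvFrame where
  | tmpl : PvFrame
  | strq : Char → PvFrame
  | expr : Int → PvFrame
deriving DecidableEq, Repr

-- the single while loop of Source B: head of the list = top of the Python stack
def machineB (cs : List Char) : Nat → Int → List PvFrame → Int
  | 0, _, _ => 0  -- fuel exhausted (unreachable for the fuel supplied at entry)
  | fuel + 1, k, stack =>
    match stack with
    | [] => k
    | f :: rest =>
      if (cs.length : Int) ≤ k then (cs.length : Int)
      else
        match PySem.List.pyGet? cs k with
        | none => 0  -- Python raises IndexError here; unreachable under Pre_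
        | some c =>
          match f with
          | .tmpl =>
            if c = '\\' then machineB cs fuel (k + 2) (PvFrame.tmpl :: rest)
            else if c = '`' then machineB cs fuel (k + 1) rest
            else if c = '$' ∧ k + 1 < (cs.length : Int) ∧ PySem.List.pyGet? cs (k + 1) = some '{' then
              machineB cs fuel (k + 2) (PvFrame.expr 1 :: PvFrame.tmpl :: rest)
            else machineB cs fuel (k + 1) (PvFrame.tmpl :: rest)
          | .strq q =>
            if c = '\\' then machineB cs fuel (k + 2) (PvFrame.strq q :: rest)
            else if c = q then machineB cs fuel (k + 1) rest
            else machineB cs fuel (k + 1) (PvFrame.strq q :: rest)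
          | .expr d =>
            if c = '"' ∨ c = '\'' then machineB cs fuel (k + 1) (PvFrame.strq c :: PvFrame.expr d :: rest)
            else if c = '`' then machineB cs fuel (k + 1) (PvFrame.tmpl :: PvFrame.expr d :: rest)
            else if c = '{' then machineB cs fuel (k + 1) (PvFrame.expr (d + 1) :: rest)
            else if c = '}' then
              if d = 1 then machineB cs fuel (k + 1) rest
              else machineB cs fuel (k + 1) (PvFrame.expr (d - 1) :: rest)
            else machineB cs fuel (k + 1) (PvFrame.expr d :: rest)

def scan_template_py_alt (text : String) (start : Int) : Int :=
  machineB text.toList (((text.toList.length : Int) - (start + 1)).toNat + 1) (start + 1)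
    [PvFrame.tmpl]

-- ===== PRECONDITION & SPEC =====
-- Pre_ excludes exactly the inputs on which Python A raises IndexError: start + 1 below
-- -len(text) (the first text[k] access is out of range even for negative indexing).
def Pre_scan_template_py (text : String) (start : Int) : Prop :=
  -(text.toList.length : Int) ≤ start + 1 ∨ (text.toList.length : Int) ≤ start + 1
instance (text : String) (start : Int) : Decidable (Pre_scan_template_py text start) := by
  unfold Pre_scan_template_py; infer_instance

def pvWitness_scan_template_py : String × Int := ("`a${1+{2:3}[\"x\"]}b`", 0)

def Spec_scan_template_py (text : String) (start : Int) (out : Int) : Prop :=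
  out = scan_template_py_alt text start
instance (text : String) (start : Int) (out : Int) : Decidable (Spec_scan_template_py text start out) := by
  unfold Spec_scan_template_py; infer_instance

-- ===== CLAIM (what is proved, stated in full; the proofs are below) =====
def Claim_equal_scan_template_py : Prop := ∀ (text : String) (start : Int),
  Dom_scan_template_py text start → Pre_scan_template_py text start →
  Spec_scan_template_py text start (scan_template_py text start)

-- ===== LEMMAS AND PROOFS =====

-- the machine run with its canonical (minimal sufficient) fuel, used to state the simulation
def mBc (cs : List Char) (k : Int) (s : List PvFrame) : Int :=
  machineB cs (((cs.length : Int) - k).toNat + 1) k s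

theorem pyGet?_some_of_inrange (cs : List Char) (k : Int)
    (h1 : -(cs.length : Int) ≤ k) (h2 : k < (cs.length : Int)) :
    ∃ c, PySem.List.pyGet? cs k = some c := by
  cases h : PySem.List.pyGet? cs k with
  | some c => exact ⟨c, rfl⟩
  | none =>
    rw [PySem.List.pyGet?_eq_none_iff] at h
    exact absurd ⟨h1, h2⟩ h

-- fuel irrelevance: any sufficient fuel computes the canonical run
theorem machineB_canon (cs : List Char) (fuel : Nat) :
    ∀ (k : Int) (s : List PvFrame), ((cs.length : Int) - k).toNat + 1 ≤ fuel →
      machineB cs fuel k s = mBc cs k s := by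
  induction fuel using Nat.strong_induction_on with
  | _ fuel ih =>
    intro k s hfuel
    obtain ⟨g, rfl⟩ : ∃ g, fuel = g + 1 := ⟨fuel - 1, by omega⟩
    unfold mBc
    cases s with
    | nil => simp only [machineB]
    | cons f rest =>
      simp only [machineB]
      by_cases hge : (cs.length : Int) ≤ k
      · simp only [if_pos hge]
      · simp only [if_neg hge]
        have hlt : k < (cs.length : Int) := by omega
        cases hc : PySem.List.pyGet? cs k with
        | none => rfl
        | some c =>
          have step : ∀ (k' : Int) (s' : List PvFrame), k < k' →
              machineB cs g k' s' = machineB cs (((cs.length : Int) - k).toNat) k' s' := by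
            intro k' s' hk'
            rw [ih g (by omega) k' s' (by omega),
              ih (((cs.length : Int) - k).toNat) (by omega) k' s' (by omega)]
          cases f <;> simp only [] <;>
            split_ifs <;> first | rfl | exact step _ _ (by omega)

theorem mBc_nil (cs : List Char) (k : Int) : mBc cs k [] = k := by
  unfold mBc
  simp only [machineB]

theorem mBc_cons_ge (cs : List Char) (k : Int) (f : PvFrame) (rest : List PvFrame)
    (h : (cs.length : Int) ≤ k) : mBc cs k (f :: rest) = (cs.length : Int) := by
  unfold mBc
  simp only [machineB]; simp [h]

theorem mBc_len (cs : List Char) (s : List PvFrame) :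
    mBc cs ((cs.length : Int)) s = (cs.length : Int) := by
  cases s with
  | nil => exact mBc_nil cs _
  | cons f rest => exact mBc_cons_ge cs _ f rest le_rfl

theorem scanStringLoopA_bounds (cs : List Char) (quote : Char) (fuel : Nat) :
    ∀ k : Int, ((cs.length : Int) - k).toNat + 1 ≤ fuel → -(cs.length : Int) ≤ k →
    (k ≤ scanStringLoopA cs quote fuel k ∨ scanStringLoopA cs quote fuel k = (cs.length : Int))
      ∧ scanStringLoopA cs quote fuel k ≤ (cs.length : Int) := by
  induction fuel with
  | zero => intro k h; omega
  | succ fuel ih =>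
    intro k hfuel hneg
    simp only [scanStringLoopA]
    by_cases hlt : k < (cs.length : Int)
    · simp only [if_pos hlt]
      obtain ⟨c, hc⟩ := pyGet?_some_of_inrange cs k hneg hlt
      simp only [hc]
      split_ifs with h1 h2
      · have := ih (k + 2) (by omega) (by omega); omega
      · omega
      · have := ih (k + 1) (by omega) (by omega); omega
    · rw [if_neg hlt]; omega

theorem simS (cs : List Char) (quote : Char) (fuel : Nat) :
    ∀ (k : Int) (s : List PvFrame), ((cs.length : Int) - k).toNat + 1 ≤ fuel →
      -(cs.length : Int) ≤ k →
      mBc cs k (PvFrame.strq quote :: s) = mBc cs (scanStringLoopA cs quote fuel k) s := by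
  induction fuel with
  | zero => intro k s h; omega
  | succ fuel ih =>
    intro k s hfuel hneg
    simp only [scanStringLoopA]
    by_cases hlt : k < (cs.length : Int)
    · simp only [if_pos hlt]
      obtain ⟨c, hc⟩ := pyGet?_some_of_inrange cs k hneg hlt
      conv_lhs => rw [mBc]
      simp only [machineB, if_neg (show ¬((cs.length : Int) ≤ k) by omega), hc]
      by_cases h1 : c = '\\'
      · simp only [if_pos h1]
        rw [machineB_canon cs _ _ _ (by omega)]
        exact ih (k + 2) s (by omega) (by omega)
      · by_cases h2 : c = quote
        · simp only [if_neg h1, if_pos h2]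
          rw [machineB_canon cs _ _ _ (by omega)]
        · simp only [if_neg h1, if_neg h2]
          rw [machineB_canon cs _ _ _ (by omega)]
          exact ih (k + 1) s (by omega) (by omega)
    · simp only [if_neg hlt]
      rw [mBc_cons_ge cs k _ s (by omega), mBc_len]

theorem boundsA (cs : List Char) (fuel : Nat) :
    (∀ k : Int, 2 * ((cs.length : Int) - k).toNat + 1 ≤ fuel → -(cs.length : Int) ≤ k →
      scanTemplateLoopA cs fuel k ≤ (cs.length : Int) ∧
      (k ≤ scanTemplateLoopA cs fuel k ∨ scanTemplateLoopA cs fuel k = (cs.length : Int))) ∧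
    (∀ (k depth : Int), 2 * ((cs.length : Int) - k).toNat + 2 ≤ fuel → -(cs.length : Int) ≤ k →
      scanExprLoopA cs fuel k depth ≤ (cs.length : Int) ∧
      (k ≤ scanExprLoopA cs fuel k depth ∨ scanExprLoopA cs fuel k depth = (cs.length : Int))) := by
  induction fuel with
  | zero => exact ⟨fun k h => by omega, fun k d h => by omega⟩
  | succ fuel ih =>
    obtain ⟨ihT, ihE⟩ := ih
    constructor
    · intro k hfuel hneg
      simp only [scanTemplateLoopA]
      by_cases hlt : k < (cs.length : Int)
      · simp only [if_pos hlt]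
        obtain ⟨c, hc⟩ := pyGet?_some_of_inrange cs k hneg hlt
        simp only [hc]
        split_ifs with h1 h2 h3
        · have := ihT (k + 2) (by omega) (by omega); omega
        · omega
        · have := ihE (k + 2) 1 (by omega) (by omega); omega
        · have := ihT (k + 1) (by omega) (by omega); omega
      · rw [if_neg hlt]; omega
    · intro k depth hfuel hneg
      simp only [scanExprLoopA]
      by_cases hcond : k < (cs.length : Int) ∧ 0 < depth
      · simp only [if_pos hcond]
        obtain ⟨c, hc⟩ := pyGet?_some_of_inrange cs k hneg hcond.1
        simp only [hc, scanStringA]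
        have hsb := scanStringLoopA_bounds cs c (((cs.length : Int) - (k + 1)).toNat + 1)
          (k + 1) le_rfl (by omega)
        split_ifs with h1 h2 h3 h4 h5
        · have := ihE (scanStringLoopA cs c (((cs.length : Int) - (k + 1)).toNat + 1) (k + 1))
            depth (by omega) (by omega); omega
        · have hb := ihT (k + 1) (by omega) (by omega)
          have := ihE (scanTemplateLoopA cs fuel (k + 1)) depth (by omega) (by omega); omega
        · have := ihE (k + 1) (depth + 1) (by omega) (by omega); omega
        · have := ihT (k + 1) (by omega) (by omega); omega
        · have := ihE (k + 1) (depth - 1) (by omega) (by omega); omega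
        · have := ihE (k + 1) depth (by omega) (by omega); omega
      · simp only [if_neg hcond]
        have := ihT k (by omega) (by omega); omega

theorem simA (cs : List Char) (fuel : Nat) :
    (∀ (k : Int) (s : List PvFrame),
      2 * ((cs.length : Int) - k).toNat + 1 ≤ fuel → (-(cs.length : Int) ≤ k ∨ (cs.length : Int) ≤ k) →
      mBc cs k (PvFrame.tmpl :: s) = mBc cs (scanTemplateLoopA cs fuel k) s) ∧
    (∀ (k depth : Int) (s : List PvFrame),
      2 * ((cs.length : Int) - k).toNat + 2 ≤ fuel → -(cs.length : Int) ≤ k → 0 < depth →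
      mBc cs k (PvFrame.expr depth :: PvFrame.tmpl :: s) =
        mBc cs (scanExprLoopA cs fuel k depth) s) := by
  induction fuel with
  | zero => exact ⟨fun k s h _ => by omega, fun k d s h _ _ => by omega⟩
  | succ fuel ih =>
    obtain ⟨ihT, ihE⟩ := ih
    constructor
    · intro k s hfuel hor
      simp only [scanTemplateLoopA]
      by_cases hlt : k < (cs.length : Int)
      · have hneg : -(cs.length : Int) ≤ k := by rcases hor with h | h <;> omega
        rw [if_pos hlt]
        obtain ⟨c, hc⟩ := pyGet?_some_of_inrange cs k hneg hlt
        conv_lhs => rw [mBc]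
        simp only [machineB, if_neg (show ¬((cs.length : Int) ≤ k) by omega), hc]
        by_cases h1 : c = '\\'
        · simp only [if_pos h1]
          rw [machineB_canon cs _ _ _ (by omega)]
          exact ihT (k + 2) s (by omega) (Or.inl (by omega))
        · by_cases h2 : c = '`'
          · simp only [if_neg h1, if_pos h2]
            rw [machineB_canon cs _ _ _ (by omega)]
          · by_cases h3 : c = '$' ∧ k + 1 < (cs.length : Int) ∧
                PySem.List.pyGet? cs (k + 1) = some '{'
            · simp only [if_neg h1, if_neg h2, if_pos h3]
              rw [machineB_canon cs _ _ _ (by omega)]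
              exact ihE (k + 2) 1 s (by omega) (by omega) (by omega)
            · simp only [if_neg h1, if_neg h2, if_neg h3]
              rw [machineB_canon cs _ _ _ (by omega)]
              exact ihT (k + 1) s (by omega) (Or.inl (by omega))
      · simp only [if_neg hlt]
        rw [mBc_cons_ge cs k _ _ (by omega), mBc_len]
    · intro k depth s hfuel hneg hdep
      simp only [scanExprLoopA]
      by_cases hlt : k < (cs.length : Int)
      · simp only [if_pos (show k < (cs.length : Int) ∧ 0 < depth from ⟨hlt, hdep⟩)]
        obtain ⟨c, hc⟩ := pyGet?_some_of_inrange cs k hneg hlt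
        rw [mBc, machineB, if_neg (show ¬((cs.length : Int) ≤ k) by omega)]
        simp only [hc, scanStringA]
        have hsb := scanStringLoopA_bounds cs c (((cs.length : Int) - (k + 1)).toNat + 1)
          (k + 1) le_rfl (by omega)
        by_cases h1 : c = '"' ∨ c = '\''
        · simp only [if_pos h1]
          rw [machineB_canon cs _ _ _ (by omega)]
          rw [simS cs c (((cs.length : Int) - (k + 1)).toNat + 1) (k + 1) _ le_rfl (by omega)]
          exact ihE (scanStringLoopA cs c (((cs.length : Int) - (k + 1)).toNat + 1) (k + 1))
            depth s (by omega) (by omega) hdep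
        · by_cases h2 : c = '`'
          · simp only [if_neg h1, if_pos h2]
            rw [machineB_canon cs _ _ _ (by omega)]
            rw [ihT (k + 1) (PvFrame.expr depth :: PvFrame.tmpl :: s) (by omega)
                (Or.inl (by omega))]
            have hb := ((boundsA cs fuel).1 (k + 1) (by omega) (by omega))
            exact ihE (scanTemplateLoopA cs fuel (k + 1)) depth s (by omega) (by omega) hdep
          · by_cases h3 : c = '{'
            · simp only [if_neg h1, if_neg h2, if_pos h3]
              rw [machineB_canon cs _ _ _ (by omega)]
              exact ihE (k + 1) (depth + 1) s (by omega) (by omega) (by omega)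
            · by_cases h4 : c = '}'
              · simp only [if_neg h1, if_neg h2, if_neg h3, if_pos h4]
                by_cases hd1 : depth = 1
                · rw [if_pos (show depth - 1 = 0 by omega), if_pos hd1]
                  rw [machineB_canon cs _ _ _ (by omega)]
                  exact ihT (k + 1) s (by omega) (Or.inl (by omega))
                · rw [if_neg (show ¬(depth - 1 = 0) by omega), if_neg hd1]
                  rw [machineB_canon cs _ _ _ (by omega)]
                  exact ihE (k + 1) (depth - 1) s (by omega) (by omega) (by omega)
              · simp only [if_neg h1, if_neg h2, if_neg h3, if_neg h4]
                rw [machineB_canon cs _ _ _ (by omega)]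
                exact ihE (k + 1) depth s (by omega) (by omega) hdep
      · simp only [if_neg (show ¬(k < (cs.length : Int) ∧ 0 < depth) from fun h => hlt h.1)]
        obtain ⟨f', rfl⟩ : ∃ f', fuel = f' + 1 := ⟨fuel - 1, by omega⟩
        simp only [scanTemplateLoopA]; rw [if_neg hlt]
        rw [mBc_cons_ge cs k _ _ (by omega), mBc_len]

-- ===== VERDICT (by name: the statement is the Claim_ definition above) =====
theorem scan_template_py_spec : Claim_equal_scan_template_py := by
  intro text start _hdom hpre
  unfold Spec_scan_template_py scan_template_py scan_template_py_alt
  rw [show machineB text.toList (((text.toList.length : Int) - (start + 1)).toNat + 1)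
      (start + 1) [PvFrame.tmpl] = mBc text.toList (start + 1) [PvFrame.tmpl] from rfl]
  rw [(simA text.toList (2 * (((text.toList.length : Int) - (start + 1)).toNat) + 1)).1
      (start + 1) [] le_rfl hpre, mBc_nil]
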